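-- pv_equiv track=rewrite | github.com/daniel-reich/ubiquitous-fiesta | ESAWnF3ySrFusHhYF_23.py | edit_words
-- ===== SOURCE A (Python) =====
-- def edit_words(lst):
--   new_lst=[]
--   for word in lst:
--     if len(word)>0:
--       if len(word)%2==0:
--         hyp_pos = len(word)/2
--       else:
--         hyp_pos = int(len(word)/2)+1
--       count = 0
--       new_word = ""
--     else:
--       new_word = "-"
--     for letter in list(reversed(word)):
--       letter = letter.upper()
--       if count+1 == hyp_pos:
--         hyphenation = letter+"-"
--         new_word+=hyphenation
--         count+=1
--       else:
--         new_word+=letter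
--         count+=1
--     new_lst.append(new_word)
--
--   return new_lst
-- ===== SOURCE B (Python) =====
-- def _hyphenate(word):
--     if not word:
--         return "-"
--     s = word[::-1].upper()
--     m = (len(s) + 1) // 2
--     return s[:m] + "-" + s[m:]
--
-- def edit_words(lst):
--     return [_hyphenate(w) for w in lst]
-- ===== Notes on version B (the rewrite author's own statement) =====
-- stated objective: simpler
-- what changed: Replaces A's per-character loop with running count and conditional hyphen-append by a closed-form split index m=(n+1)//2 on the reversed uppercased word and a single slice concatenation s[:m]+'-'+s[m:], avoiding quadratic string += growth.
import Mathlib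
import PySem

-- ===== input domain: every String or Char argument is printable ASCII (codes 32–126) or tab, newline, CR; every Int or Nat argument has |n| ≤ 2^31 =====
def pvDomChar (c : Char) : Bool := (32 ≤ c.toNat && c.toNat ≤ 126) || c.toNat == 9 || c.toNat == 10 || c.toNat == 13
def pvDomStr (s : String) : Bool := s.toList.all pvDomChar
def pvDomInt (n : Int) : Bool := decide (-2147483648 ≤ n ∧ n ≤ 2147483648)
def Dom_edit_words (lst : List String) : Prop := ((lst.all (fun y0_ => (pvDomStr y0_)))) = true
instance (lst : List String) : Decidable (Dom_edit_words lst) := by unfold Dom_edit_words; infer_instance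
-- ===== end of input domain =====

-- B is simpler: it replaces A's per-character loop, counter and conditional hyphen-append
-- by a closed-form split index m = (n+1)//2 and a single slice concatenation.

-- ===== PORT A =====
-- A's inner loop: fold over the reversed characters carrying (new_word, count)
def edit_words (lst : List String) : List String :=
  lst.foldl (fun new_lst word =>
    let cs := word.toList
    let new_word : List Char :=
      if cs.length > 0 then
        let hyp_pos : Nat := if cs.length % 2 = 0 then cs.length / 2 else cs.length / 2 + 1
        (cs.reverse.foldl (fun (st : List Char × Nat) letter =>
          let letter := PySem.Chars.upperChar letter
          if st.2 + 1 = hyp_pos then (st.1 ++ [letter, '-'], st.2 + 1)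
          else (st.1 ++ [letter], st.2 + 1)) ([], 0)).1
      else ['-']
    new_lst ++ [String.ofList new_word]) []

-- ===== PORT B =====
def hyphenate (word : String) : String :=
  if word.toList = [] then "-"
  else
    let s := PySem.Chars.upper word.toList.reverse   -- word[::-1].upper()
    let m : Nat := (s.length + 1) / 2
    String.ofList (PySem.List.slice s none (some (m : Int)) ++ '-' :: PySem.List.slice s (some (m : Int)) none)

def edit_words_alt (lst : List String) : List String := lst.map hyphenate

-- ===== PRECONDITION & SPEC =====
def Spec_edit_words (lst : List String) (out : List String) : Prop := out = edit_words_alt lst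
instance (lst : List String) (out : List String) : Decidable (Spec_edit_words lst out) := by unfold Spec_edit_words; infer_instance

-- ===== CLAIM (what is proved, stated in full; the proofs are below) =====
def Claim_equal_edit_words : Prop := ∀ (lst : List String), Dom_edit_words lst → Spec_edit_words lst (edit_words lst)

-- ===== LEMMAS AND PROOFS =====

-- A's inner loop, generalized over accumulator and counter: it uppercases everything and
-- emits a '-' right after the character processed when the counter hits m.
theorem innerLoop_eq (m : Nat) (xs : List Char) (acc : List Char) (c : Nat) :
    (xs.foldl (fun (st : List Char × Nat) letter =>
        let letter := PySem.Chars.upperChar letter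
        if st.2 + 1 = m then (st.1 ++ [letter, '-'], st.2 + 1)
        else (st.1 ++ [letter], st.2 + 1)) (acc, c)).1
    = acc ++ (xs.map PySem.Chars.upperChar).take (m - c)
        ++ (if c < m ∧ m ≤ c + xs.length then ['-'] else [])
        ++ (xs.map PySem.Chars.upperChar).drop (m - c) := by
  induction xs generalizing acc c with
  | nil =>
    simp only [List.foldl_nil, List.map_nil, List.take_nil, List.drop_nil, List.append_nil,
      List.length_nil, Nat.add_zero]
    rw [if_neg (by omega)]
    simp
  | cons x xs ih =>
    simp only [List.foldl_cons, List.map_cons, List.length_cons]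
    by_cases h : c + 1 = m
    · simp only [if_pos h, ih]
      have h1 : m - (c + 1) = 0 := by omega
      have h2 : m - c = 1 := by omega
      rw [if_neg (by omega), if_pos (by omega), h1, h2]
      simp
    · simp only [if_neg h, ih]
      rcases Nat.lt_or_ge c m with hc | hc
      · have h2 : m - c = (m - (c + 1)) + 1 := by omega
        rw [h2, List.take_succ_cons, List.drop_succ_cons]
        by_cases hb : m ≤ c + 1 + xs.length
        · rw [if_pos (by omega), if_pos (by constructor <;> omega)]
          simp
        · rw [if_neg (by omega), if_neg (by omega)]
          simp
      · have h1 : m - c = 0 := by omega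
        have h2 : m - (c + 1) = 0 := by omega
        rw [h1, h2, if_neg (by omega), if_neg (by omega)]
        simp

theorem word_eq (word : String) :
    String.ofList (let cs := word.toList
      if cs.length > 0 then
        let hyp_pos : Nat := if cs.length % 2 = 0 then cs.length / 2 else cs.length / 2 + 1
        (cs.reverse.foldl (fun (st : List Char × Nat) letter =>
          let letter := PySem.Chars.upperChar letter
          if st.2 + 1 = hyp_pos then (st.1 ++ [letter, '-'], st.2 + 1)
          else (st.1 ++ [letter], st.2 + 1)) ([], 0)).1
      else ['-']) = hyphenate word := by
  unfold hyphenate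
  by_cases h0 : word.toList = []
  · simp [h0]
  · have hl : word.toList.length > 0 := List.length_pos_of_ne_nil h0
    simp only [if_neg h0, if_pos hl]
    set n := word.toList.length with hn
    have hm : (if n % 2 = 0 then n / 2 else n / 2 + 1) = (n + 1) / 2 := by
      split_ifs <;> omega
    rw [hm, innerLoop_eq]
    have hup : PySem.Chars.upper word.toList.reverse
        = word.toList.reverse.map PySem.Chars.upperChar := rfl
    rw [hup, PySem.List.slice_to_natCast, PySem.List.slice_from_natCast]
    have hcond : 0 < (n + 1) / 2 ∧ (n + 1) / 2 ≤ 0 + word.toList.reverse.length := by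
      simp only [List.length_reverse, ← hn]
      constructor <;> omega
    rw [if_pos hcond]
    simp only [Nat.sub_zero, List.map_reverse, List.nil_append]
    have hwl : word.length = n := by simp [hn]
    simp [hwl]

theorem foldl_append_map (g : String → String) (lst : List String) (acc : List String) :
    lst.foldl (fun nl w => nl ++ [g w]) acc = acc ++ lst.map g := by
  induction lst generalizing acc with
  | nil => simp
  | cons x xs ih => simp [ih]

-- ===== VERDICT (by name: the statement is the Claim_ definition above) =====
theorem edit_words_spec : Claim_equal_edit_words := by
  intro lst _
  show edit_words lst = edit_words_alt lst
  unfold edit_words edit_words_alt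
  rw [show (fun (new_lst : List String) (word : String) =>
      new_lst ++ [String.ofList (let cs := word.toList
        if cs.length > 0 then
          let hyp_pos : Nat := if cs.length % 2 = 0 then cs.length / 2 else cs.length / 2 + 1
          (cs.reverse.foldl (fun (st : List Char × Nat) letter =>
            let letter := PySem.Chars.upperChar letter
            if st.2 + 1 = hyp_pos then (st.1 ++ [letter, '-'], st.2 + 1)
            else (st.1 ++ [letter], st.2 + 1)) ([], 0)).1
        else ['-'])])
     = (fun nl w => nl ++ [hyphenate w]) from funext fun nl => funext fun w => by rw [word_eq]]
  rw [foldl_append_map]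
  simp
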